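-- pv_equiv track=rewrite | github.com/PchelobaF/Programming-technologies | lab1.py | find_chain
-- ===== SOURCE A (Python) =====
-- def del_min_num(start_chain: int, end_chain: int, list_numbers: list) -> None:
--     # Удаляем минимальный элемент цепочки
--     new_list = list_numbers[start_chain:end_chain]
--     min_index = start_chain + new_list.index(min(new_list))
--     del list_numbers[min_index]
--
-- def find_chain(list_numbers: list) -> list:
--     #Находим индексы начала и конца цепочки четных чисел
--     i = 0
--     while i < len(list_numbers):
--         if list_numbers[i] % 2 == 0:
--             start_chain = i
--             while i < len(list_numbers) and list_numbers[i] % 2 == 0: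
--                 i += 1
--             end_chain = i
--             del_min_num(start_chain, end_chain, list_numbers)
--         else:
--             i += 1
--     return list_numbers
-- ===== SOURCE B (Python) =====
-- def find_chain(list_numbers: list) -> list:
--     # Single pass: collect each maximal run of even numbers, emit it without
--     # its first minimum; odd numbers pass through. (A mutates its argument in
--     # place; B builds a new list — return values agree.)
--     out = []
--     run = []
--     for x in list_numbers:
--         if x % 2 == 0:
--             run.append(x)
--         else:
--             if run:
--                 k = run.index(min(run))
--                 out.extend(run[:k] + run[k+1:])
--                 run = []
--             out.append(x)
--     if run:
--         k = run.index(min(run))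
--         out.extend(run[:k] + run[k+1:])
--     return out
-- ===== Notes on version B (the rewrite author's own statement) =====
-- stated objective: alternative
-- what changed: B makes one forward pass that buffers each maximal run of even numbers and emits it without its first minimum, instead of A's in-place index loop that re-slices the list and deletes elements (shifting the tail) for every even chain; it trades A's in-place mutation for building a new list.
import Mathlib
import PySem

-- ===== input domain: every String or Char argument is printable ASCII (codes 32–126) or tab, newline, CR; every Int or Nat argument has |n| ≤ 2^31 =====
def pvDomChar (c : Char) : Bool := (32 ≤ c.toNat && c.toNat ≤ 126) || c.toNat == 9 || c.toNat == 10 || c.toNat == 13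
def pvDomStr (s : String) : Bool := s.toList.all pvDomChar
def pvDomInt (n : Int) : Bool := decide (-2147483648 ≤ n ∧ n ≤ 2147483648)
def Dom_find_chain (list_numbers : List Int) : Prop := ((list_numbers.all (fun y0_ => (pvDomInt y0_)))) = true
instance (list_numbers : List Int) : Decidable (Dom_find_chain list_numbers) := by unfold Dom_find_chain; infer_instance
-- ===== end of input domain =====

-- B rebuilds the result in one pass instead of repeatedly slicing/deleting in place;
-- A mutates its argument in place (B does not) — the equivalence proved here is about the return value.

-- ===== PORT A =====
-- x % 2 == 0  (Python mod)
def pvEven (x : Int) : Bool := PySem.Int.mod x 2 == 0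

-- del_min_num: slice, min, index, del  (the `none` fallbacks guard totality only;
-- Python would raise there and find_chain never reaches them: the slice is nonempty and in range)
def del_min_num (start_chain end_chain : Nat) (list_numbers : List Int) : List Int :=
  let new_list := PySem.List.slice list_numbers (some (start_chain : Int)) (some (end_chain : Int))
  match PySem.List.min? new_list (fun y => y) with
  | none => list_numbers
  | some m =>
    match PySem.List.index? new_list m with
    | none => list_numbers
    | some k =>
      match PySem.List.pop? list_numbers ((start_chain + k : Nat) : Int) with
      | none => list_numbers
      | some r => r.2

-- inner while: advance i while i < len and list[i] % 2 == 0
def advEven (l : List Int) (i : Nat) : Nat :=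
  if h : i < l.length then
    if pvEven l[i] then advEven l (i + 1) else i
  else i
termination_by l.length - i

-- outer while loop; fuel only makes the in-place loop total (never exhausted: see proof)
def loopA : Nat → List Int → Nat → List Int
  | 0, l, _ => l
  | fuel + 1, l, i =>
    if h : i < l.length then
      if pvEven l[i] then
        let j := advEven l i
        loopA fuel (del_min_num i j l) j
      else loopA fuel l (i + 1)
    else l

def find_chain (list_numbers : List Int) : List Int :=
  loopA (list_numbers.length + 1) list_numbers 0

-- ===== PORT B =====
-- run without its first minimum: run[:k] + run[k+1:] with k = run.index(min(run))
def flushB (run : List Int) : List Int :=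
  match PySem.List.min? run (fun y => y) with
  | none => run
  | some m =>
    match PySem.List.index? run m with
    | none => run
    | some k =>
      PySem.List.slice run none (some (k : Int)) ++ PySem.List.slice run (some ((k : Nat) + 1 : Int)) none

def loopB : List Int → List Int → List Int → List Int
  | [], out, run => if run.isEmpty then out else out ++ flushB run
  | x :: rest, out, run =>
    if pvEven x then loopB rest out (run ++ [x])
    else loopB rest ((if run.isEmpty then out else out ++ flushB run) ++ [x]) []

def find_chain_alt (list_numbers : List Int) : List Int :=
  loopB list_numbers [] []

-- ===== PRECONDITION & SPEC =====
def Spec_find_chain (list_numbers : List Int) (out : List Int) : Prop := out = find_chain_alt list_numbers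
instance (list_numbers : List Int) (out : List Int) : Decidable (Spec_find_chain list_numbers out) := by unfold Spec_find_chain; infer_instance

-- ===== CLAIM (what is proved, stated in full; the proofs are below) =====
def Claim_equal_find_chain : Prop := ∀ (list_numbers : List Int), Dom_find_chain list_numbers → Spec_find_chain list_numbers (find_chain list_numbers)

-- ===== LEMMAS AND PROOFS =====

-- canonical result: odd numbers pass through, each maximal even run loses its first minimum
def specFC : List Int → List Int
  | [] => []
  | x :: r =>
    if pvEven x then flushB (x :: r.takeWhile pvEven) ++ specFC (r.dropWhile pvEven)
    else x :: specFC r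
termination_by l => l.length
decreasing_by
  · exact Nat.lt_succ_of_le (List.Sublist.length_le (List.dropWhile_sublist _))
  · simp

theorem specFC_nil : specFC [] = [] := by rw [specFC.eq_def]

theorem specFC_cons (x : Int) (r : List Int) :
    specFC (x :: r) =
      if pvEven x then flushB (x :: r.takeWhile pvEven) ++ specFC (r.dropWhile pvEven)
      else x :: specFC r := by
  rw [specFC.eq_def]

-- head of the remaining part of the list fails pvEven (dropWhile characterisation)
theorem head_dropWhile_even (r : List Int) :
    ∀ y ∈ (r.dropWhile pvEven).head?, pvEven y = false := by
  intro y hy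
  cases hd : r.dropWhile pvEven with
  | nil => simp [hd] at hy
  | cons z t =>
    rw [hd] at hy; simp at hy; subst hy
    have h0 : 0 < (r.dropWhile pvEven).length := by simp [hd]
    have := List.dropWhile_get_zero_not (p := pvEven) r h0
    simpa [hd] using this

theorem flushB_take_drop (run : List Int) (h : run ≠ []) :
    ∃ k, k < run.length ∧ flushB run = run.take k ++ run.drop (k + 1) := by
  unfold flushB
  obtain ⟨m, hm⟩ : ∃ m, PySem.List.min? run (fun y => y) = some m := by
    cases hmin : PySem.List.min? run (fun y => y) with
    | none => exact absurd ((PySem.List.min?_eq_none_iff _ _).mp hmin) h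
    | some m => exact ⟨m, rfl⟩
  obtain ⟨k, hk⟩ : ∃ k, PySem.List.index? run m = some k :=
    Option.isSome_iff_exists.mp ((PySem.List.index?_isSome_iff run m).mpr (PySem.List.min?_mem hm))
  obtain ⟨hklt, -, -⟩ := PySem.List.getElem_of_index?_eq_some hk
  refine ⟨k, hklt, ?_⟩
  rw [hm]; dsimp only; rw [hk]; dsimp only
  rw [PySem.List.slice_to_natCast]
  have h2 := PySem.List.slice_from_natCast run (k + 1)
  simp at h2 ⊢
  rw [h2]

theorem flushB_length (run : List Int) (h : run ≠ []) :
    (flushB run).length + 1 = run.length := by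
  obtain ⟨k, hk, he⟩ := flushB_take_drop run h
  simp [he]
  omega

theorem del_min_eq (done run rest' : List Int) (h : run ≠ []) :
    del_min_num done.length (done.length + run.length) (done ++ (run ++ rest')) =
      done ++ (flushB run ++ rest') := by
  unfold del_min_num
  have hsl : PySem.List.slice (done ++ (run ++ rest')) (some (done.length : Int))
      (some ((done.length + run.length : Nat) : Int)) = run := by
    rw [show ((done.length + run.length : Nat) : Int)
        = ((done.length : Nat) : Int) + ((run.length : Nat) : Int) by push_cast; ring]
    rw [PySem.List.slice_natCast_add]
    simp
  rw [hsl]; dsimp only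
  obtain ⟨m, hm⟩ : ∃ m, PySem.List.min? run (fun y => y) = some m := by
    cases hmin : PySem.List.min? run (fun y => y) with
    | none => exact absurd ((PySem.List.min?_eq_none_iff _ _).mp hmin) h
    | some m => exact ⟨m, rfl⟩
  obtain ⟨k, hk⟩ : ∃ k, PySem.List.index? run m = some k :=
    Option.isSome_iff_exists.mp ((PySem.List.index?_isSome_iff run m).mpr (PySem.List.min?_mem hm))
  obtain ⟨hklt, -, -⟩ := PySem.List.getElem_of_index?_eq_some hk
  rw [hm]; dsimp only; rw [hk]; dsimp only
  have hlt : done.length + k < (done ++ (run ++ rest')).length := by simp; omega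
  rw [PySem.List.pop?_natCast _ _ hlt]; dsimp only
  rw [List.eraseIdx_eq_take_drop_succ]
  have hfl : flushB run = run.take k ++ run.drop (k + 1) := by
    unfold flushB
    rw [hm]; dsimp only; rw [hk]; dsimp only
    rw [PySem.List.slice_to_natCast]
    have h2 := PySem.List.slice_from_natCast run (k + 1)
    simp at h2 ⊢
    rw [h2]
  rw [hfl]
  have ht : (done ++ (run ++ rest')).take (done.length + k) = done ++ run.take k := by
    rw [List.take_append, List.take_of_length_le (by omega)]
    simp [List.take_append_of_le_length (Nat.le_of_lt hklt)]
  have hd : (done ++ (run ++ rest')).drop (done.length + k + 1) = run.drop (k + 1) ++ rest' := by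
    rw [show done.length + k + 1 = done.length + (k + 1) by ring, List.drop_append,
      List.drop_of_length_le (by omega)]
    simp [List.drop_append_of_le_length (Nat.succ_le_of_lt hklt)]
  rw [ht, hd]
  simp

theorem advEven_eq (done run rest' : List Int) (hrun : ∀ x ∈ run, pvEven x = true)
    (hrest : ∀ y ∈ rest'.head?, pvEven y = false) :
    advEven (done ++ (run ++ rest')) done.length = done.length + run.length := by
  induction run generalizing done with
  | nil =>
    rw [advEven]
    cases rest' with
    | nil => simp
    | cons y r2 =>
      have hlt : done.length < (done ++ ([] ++ y :: r2)).length := by simp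
      have hget : (done ++ ([] ++ y :: r2))[done.length]'hlt = y := by
        simp [List.getElem_append_right (Nat.le_refl done.length)]
      simp only [hlt, dif_pos, hget]
      simp [hrest y (by simp)]
  | cons x run2 ih =>
    rw [advEven]
    have hlt : done.length < (done ++ (x :: run2 ++ rest')).length := by simp
    have hget : (done ++ (x :: run2 ++ rest'))[done.length]'hlt = x := by
      simp [List.getElem_append_right (Nat.le_refl done.length)]
    simp only [hlt, dif_pos, hget, hrun x (by simp), if_pos]
    have := ih (done ++ [x]) (fun z hz => hrun z (by simp [hz]))
    simp only [List.append_assoc, List.cons_append, List.nil_append, List.length_append,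
      List.length_cons, List.length_nil, Nat.zero_add] at this ⊢
    rw [this]
    omega

theorem tw_dw (run2 rest' : List Int) (h2 : ∀ w ∈ run2, pvEven w = true)
    (hrest : ∀ y ∈ rest'.head?, pvEven y = false) :
    (run2 ++ rest').takeWhile pvEven = run2 ∧ (run2 ++ rest').dropWhile pvEven = rest' := by
  induction run2 with
  | nil =>
    cases rest' with
    | nil => simp
    | cons y r2 =>
      have := hrest y (by simp)
      simp [this]
  | cons z t iht =>
    have hz : pvEven z = true := h2 z (by simp)
    have := iht (fun w hw => h2 w (by simp [hw]))
    simp [hz, this]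

theorem spec_chain (run rest' : List Int) (h : run ≠ []) (hrun : ∀ x ∈ run, pvEven x = true)
    (hrest : ∀ y ∈ rest'.head?, pvEven y = false) :
    specFC (run ++ rest') = flushB run ++ specFC rest' := by
  cases run with
  | nil => exact absurd rfl h
  | cons x run2 =>
    have htw := tw_dw run2 rest' (fun w hw => hrun w (by simp [hw])) hrest
    simp only [List.cons_append]
    rw [specFC_cons]
    simp only [hrun x (by simp), if_pos, htw.1, htw.2]

theorem loopA_done (fuel : Nat) (l : List Int) (i : Nat) (h : l.length ≤ i) :
    loopA fuel l i = l := by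
  cases fuel with
  | zero => rfl
  | succ f => simp [loopA, Nat.not_lt.mpr h]

theorem loopA_inv (fuel : Nat) (rest done : List Int) (h : rest.length < fuel) :
    loopA fuel (done ++ rest) done.length = done ++ specFC rest := by
  induction fuel generalizing rest done with
  | zero => omega
  | succ f ih =>
    cases rest with
    | nil => rw [loopA_done (f + 1) _ _ (by simp)]; simp [specFC_nil]
    | cons x r =>
      rw [loopA]
      have hlt : done.length < (done ++ x :: r).length := by simp
      have hget : (done ++ x :: r)[done.length]'hlt = x := by
        simp [List.getElem_append_right (Nat.le_refl done.length)]
      simp only [hlt, dif_pos, hget]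
      cases hpx : pvEven x with
      | false =>
        have h1 : loopA f ((done ++ [x]) ++ r) (done ++ [x]).length = (done ++ [x]) ++ specFC r :=
          ih r (done ++ [x]) (by simp at h; omega)
        simp only [List.append_assoc, List.cons_append, List.nil_append, List.length_append,
          List.length_cons, List.length_nil] at h1
        rw [if_neg (by simp)]
        rw [h1]
        simp [specFC_cons, hpx]
      | true =>
        rw [if_pos rfl]
        -- decompose the chain
        set run := x :: r.takeWhile pvEven with hrundef
        set rest' := r.dropWhile pvEven with hrestdef
        have hne : run ≠ [] := by simp [hrundef]
        have hsplit : x :: r = run ++ rest' := by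
          simp [hrundef, hrestdef, List.takeWhile_append_dropWhile]
        have hrunall : ∀ z ∈ run, pvEven z = true := by
          intro z hz
          rcases List.mem_cons.mp hz with h1 | h1
          · subst h1; exact hpx
          · exact List.mem_takeWhile_imp h1
        have hresthead : ∀ y ∈ rest'.head?, pvEven y = false := head_dropWhile_even r
        have hadv : advEven (done ++ x :: r) done.length = done.length + run.length := by
          rw [show done ++ x :: r = done ++ (run ++ rest') by rw [← hsplit]]
          exact advEven_eq done run rest' hrunall hresthead
        rw [hadv]
        have hdel : del_min_num done.length (done.length + run.length) (done ++ x :: r)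
            = done ++ (flushB run ++ rest') := by
          rw [show done ++ x :: r = done ++ (run ++ rest') by rw [← hsplit]]
          exact del_min_eq done run rest' hne
        rw [hdel]
        have hflen : (flushB run).length + 1 = run.length := flushB_length run hne
        have hspec : specFC (x :: r) = flushB run ++ specFC rest' := by
          rw [hsplit]; exact spec_chain run rest' hne hrunall hresthead
        cases hre : rest' with
        | nil =>
          rw [loopA_done f _ _ (by simp; omega)]
          rw [hspec, hre]
          simp [specFC_nil]
        | cons y r2 =>
          have hylen : done.length + run.length = (done ++ flushB run ++ [y]).length := by
            simp; omega
          have hllist : done ++ (flushB run ++ y :: r2) = (done ++ flushB run ++ [y]) ++ r2 := by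
            simp
          rw [hllist, hylen]
          have hr2 : r2.length < f := by
            have hlenx : (x :: r).length = run.length + rest'.length := by
              rw [hsplit]; simp
            rw [hre] at hlenx
            simp at h hlenx
            omega
          rw [ih r2 (done ++ flushB run ++ [y]) hr2]
          have hy : pvEven y = false := by
            have := head_dropWhile_even r
            rw [← hrestdef, hre] at this
            exact this y (by simp)
          rw [hspec, hre]
          simp [specFC_cons, hy]

theorem loopB_inv (rest out run : List Int) (hrun : ∀ x ∈ run, pvEven x = true) :
    loopB rest out run = out ++ specFC (run ++ rest) := by
  induction rest generalizing out run with
  | nil =>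
    rw [loopB]
    cases run with
    | nil => simp [specFC_nil]
    | cons z t =>
      have := spec_chain (z :: t) [] (by simp) hrun (by simp)
      simp only [List.append_nil] at this ⊢
      rw [this]
      simp [List.isEmpty, specFC_nil]
  | cons x r ih =>
    rw [loopB]
    cases hpx : pvEven x with
    | true =>
      rw [ih _ (run ++ [x]) ?_]
      · simp
      · intro z hz
        rcases List.mem_append.mp hz with h1 | h1
        · exact hrun z h1
        · simp at h1; subst h1; exact hpx
    | false =>
      rw [if_neg (by simp)]
      rw [ih _ [] (by simp)]
      cases run with
      | nil => simp [List.isEmpty, specFC_cons, hpx]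
      | cons z t =>
        have := spec_chain (z :: t) (x :: r) (by simp) hrun (by simp [hpx])
        rw [this]
        simp [List.isEmpty, specFC_cons, hpx]

-- ===== VERDICT (by name: the statement is the Claim_ definition above) =====
theorem find_chain_spec : Claim_equal_find_chain := by
  intro l _
  show find_chain l = find_chain_alt l
  have hA := loopA_inv (l.length + 1) l [] (Nat.lt_succ_self _)
  have hB := loopB_inv l [] [] (by simp)
  simp at hA hB
  simp [find_chain, find_chain_alt, hA, hB]
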